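-- pv_equiv track=rewrite | github.com/GSK-Biostatistics/tab2neo | derivation_method/utils.py | add_warn_log_if_column_missing
-- ===== SOURCE A (Python) =====
-- def add_warn_log_if_column_missing(col_names : list):
--     missing_cols = set()
--     for i in col_names:
--         if i.startswith('_id_'):
--             if not i[4:] in col_names:
--                 missing_cols.add(i[4:])
--         else:
--             if not "_id_"+i in col_names:
--                 missing_cols.add("_id_"+i)
--     return missing_cols
-- ===== SOURCE B (Python) =====
-- def add_warn_log_if_column_missing(col_names: list):
--     # Pair each base with its '_id_' counterpart: classify every name in one
--     # linear pass into per-key flags (key present / key present unprefixed /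
--     # '_id_'+key present), then read the missing counterparts off the flags.
--     flags = {}  # key -> [key_present, key_present_plain, id_key_present]
--     for n in col_names:
--         if n.startswith('_id_'):
--             f = flags.setdefault(n, [False, False, False])
--             f[0] = True
--             fb = flags.setdefault(n[4:], [False, False, False])
--             fb[2] = True
--         else:
--             f = flags.setdefault(n, [False, False, False])
--             f[0] = True
--             f[1] = True
--     missing = set()
--     for k, (present, plain, has_id) in flags.items():
--         if has_id and not present:
--             missing.add(k)
--         elif plain and not has_id:
--             missing.add('_id_' + k)
--     return missing
-- ===== Notes on version B (the rewrite author's own statement) =====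
-- stated objective: faster
-- what changed: Instead of testing each name's counterpart against the whole list (per-element branch + O(n) list membership), B groups names by their base key in one linear pass, recording three flags per key (key present, key present unprefixed, '_id_'+key present), and a second pass over the flag table emits the missing counterparts.
import Mathlib
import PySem

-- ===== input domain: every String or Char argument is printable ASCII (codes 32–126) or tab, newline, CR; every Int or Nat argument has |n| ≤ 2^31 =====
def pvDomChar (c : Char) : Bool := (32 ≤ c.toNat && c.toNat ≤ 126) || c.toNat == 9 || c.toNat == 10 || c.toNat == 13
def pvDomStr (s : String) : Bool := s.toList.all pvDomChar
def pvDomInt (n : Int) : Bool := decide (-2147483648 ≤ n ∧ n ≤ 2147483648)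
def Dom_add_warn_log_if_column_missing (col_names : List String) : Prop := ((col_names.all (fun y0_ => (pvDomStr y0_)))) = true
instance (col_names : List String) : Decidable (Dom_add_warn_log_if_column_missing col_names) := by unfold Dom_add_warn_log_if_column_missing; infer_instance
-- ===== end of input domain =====

-- B replaces A's per-name scan of the whole list (an O(n) membership test for each
-- name's counterpart) by a pairing algorithm: one linear pass classifies every name
-- into per-key flags (key present / present unprefixed / '_id_'+key present), and a
-- second pass over the flag table reads off the missing counterparts.
-- Return is a Python set (PySem.Set, compared as a finite set).

-- ===== PORT A =====
def add_warn_log_if_column_missing (col_names : List String) : List String :=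
  col_names.foldl (fun missing_cols i =>
    if PySem.Str.startswith i "_id_" then
      if !(col_names.contains (PySem.Str.slice i (some 4) none)) then
        PySem.Set.add missing_cols (PySem.Str.slice i (some 4) none)
      else missing_cols
    else
      if !(col_names.contains ("_id_" ++ i)) then
        PySem.Set.add missing_cols ("_id_" ++ i)
      else missing_cols) PySem.Set.empty

-- ===== PORT B =====
-- one iteration of B's first loop: setdefault-and-mutate = getD then insert
def pvUpd (d : PySem.Dict String (Bool × Bool × Bool)) (n : String) :
    PySem.Dict String (Bool × Bool × Bool) :=
  if PySem.Str.startswith n "_id_" then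
    let f := PySem.Dict.getD d n (false, false, false)
    let d1 := PySem.Dict.insert d n (true, f.2.1, f.2.2)
    let fb := PySem.Dict.getD d1 (PySem.Str.slice n (some 4) none) (false, false, false)
    PySem.Dict.insert d1 (PySem.Str.slice n (some 4) none) (fb.1, fb.2.1, true)
  else
    let f := PySem.Dict.getD d n (false, false, false)
    PySem.Dict.insert d n (true, true, f.2.2)

def add_warn_log_if_column_missing_alt (col_names : List String) : List String :=
  let flags := col_names.foldl pvUpd PySem.Dict.empty
  flags.items.foldl (fun missing kf =>
    if kf.2.2.2 && !kf.2.1 then PySem.Set.add missing kf.1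
    else if kf.2.2.1 && !kf.2.2.2 then PySem.Set.add missing ("_id_" ++ kf.1)
    else missing) PySem.Set.empty

-- ===== PRECONDITION & SPEC =====
def Spec_add_warn_log_if_column_missing (col_names : List String) (out : List String) : Prop := out = add_warn_log_if_column_missing_alt col_names
instance (col_names : List String) (out : List String) : Decidable (Spec_add_warn_log_if_column_missing col_names out) := by unfold Spec_add_warn_log_if_column_missing; infer_instance

-- ===== CLAIM (what is proved, stated in full; the proofs are below) =====
def Claim_equal_add_warn_log_if_column_missing : Prop := ∀ (col_names : List String), Dom_add_warn_log_if_column_missing col_names → Spec_add_warn_log_if_column_missing col_names (add_warn_log_if_column_missing col_names)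

-- ===== LEMMAS AND PROOFS =====

-- ---- string facts about the '_id_' prefix ----

lemma pv_pref_append (s : String) : PySem.Str.startswith ("_id_" ++ s) "_id_" = true := by
  simp [PySem.Chars.startswith_iff]

lemma pv_append_ne (s : String) : "_id_" ++ s ≠ s := by
  intro h
  have := congrArg (·.toList.length) h
  simp at this
  omega

lemma pv_append_inj {a b : String} (h : "_id_" ++ a = "_id_" ++ b) : a = b := by
  have := congrArg (·.toList) h
  simp at this
  exact String.toList_inj.mp this

lemma pv_pref_recover {n : String} (h : PySem.Str.startswith n "_id_" = true) :
    "_id_" ++ PySem.Str.slice n (some 4) none = n := by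
  rw [← String.toList_inj]
  simp [PySem.Chars.startswith_iff] at h
  obtain ⟨t, ht⟩ := h
  simp [PySem.Str.toList_slice, ← ht,
    PySem.List.slice_from _ (by norm_num : (0:Int) ≤ 4)]

-- ---- proof-side descriptions of B's flag table ----

def pvTouch (n : String) : List String :=
  if PySem.Str.startswith n "_id_" then [n, PySem.Str.slice n (some 4) none] else [n]

def pvVal (names : List String) (k : String) : Bool × Bool × Bool :=
  (decide (k ∈ names),
    (decide (k ∈ names) && !PySem.Str.startswith k "_id_",
     decide (("_id_" ++ k) ∈ names)))

-- emission functions: what each loop adds, per element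
def pvE (names : List String) (k : String) : Option String :=
  if decide (("_id_" ++ k) ∈ names) && !decide (k ∈ names) then some k
  else if (decide (k ∈ names) && !PySem.Str.startswith k "_id_")
          && !decide (("_id_" ++ k) ∈ names) then some ("_id_" ++ k)
  else none

def pvEA (names : List String) (i : String) : Option String :=
  if PySem.Str.startswith i "_id_" then
    (if decide (PySem.Str.slice i (some 4) none ∈ names) then none
     else some (PySem.Str.slice i (some 4) none))
  else
    (if decide (("_id_" ++ i) ∈ names) then none else some ("_id_" ++ i))

def pvStep (e : String → Option String) (s : List String) (k : String) : List String :=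
  match e k with
  | some v => PySem.Set.add s v
  | none => s

-- ---- flag-table invariants ----

lemma pv_flags_getD (l : List String) (k : String) :
    PySem.Dict.getD (l.foldl pvUpd PySem.Dict.empty) k (false, false, false) = pvVal l k := by
  induction l using List.reverseRecOn generalizing k with
  | nil => simp [pvVal, PySem.Dict.getD_empty]
  | append_singleton l n ih =>
      rw [List.foldl_append, List.foldl_cons, List.foldl_nil]
      generalize hd : List.foldl pvUpd PySem.Dict.empty l = d
      rw [hd] at ih
      unfold pvUpd
      by_cases hp : PySem.Str.startswith n "_id_" = true
      · rw [if_pos hp]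
        have hrec := pv_pref_recover hp
        have hbn : PySem.Str.slice n (some 4) none ≠ n :=
          fun h => pv_append_ne _ (hrec.trans h.symm)
        simp only [PySem.Dict.getD_insert]
        by_cases hkb : k = PySem.Str.slice n (some 4) none
        · rw [if_pos hkb, if_neg (hkb ▸ hbn), ih]
          subst hkb
          simp only [pvVal]
          refine Prod.ext ?_ (Prod.ext ?_ ?_)
          · simp [List.mem_append, hbn]
          · simp [List.mem_append, hbn]
          · simp [hrec, List.mem_append]
        · rw [if_neg hkb]
          by_cases hkn : k = n
          · rw [if_pos hkn, ih]
            subst hkn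
            have hp' : PySem.Chars.startswith k.toList ['_', 'i', 'd', '_'] = true := by
              simpa using hp
            simp only [pvVal]
            refine Prod.ext ?_ (Prod.ext ?_ ?_)
            · simp [List.mem_append]
            · simp [hp']
            · simp [List.mem_append, pv_append_ne k]
          · rw [if_neg hkn, ih]
            have hik : ("_id_" ++ k) ≠ n := by
              intro h
              exact hkb (pv_append_inj (h.trans hrec.symm))
            simp [pvVal, List.mem_append, hkn, hik]
      · rw [if_neg hp]
        simp only [PySem.Dict.getD_insert]
        by_cases hkn : k = n
        · rw [if_pos hkn, ih]
          subst hkn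
          have hp' : PySem.Chars.startswith k.toList ['_', 'i', 'd', '_'] = false := by
            simpa using hp
          simp only [pvVal]
          refine Prod.ext ?_ (Prod.ext ?_ ?_)
          · simp [List.mem_append]
          · simp [List.mem_append, hp']
          · simp [List.mem_append, pv_append_ne k]
        · rw [if_neg hkn, ih]
          have hik : ("_id_" ++ k) ≠ n := by
            intro h
            rw [← h] at hp
            exact hp (pv_pref_append k)
          simp [pvVal, List.mem_append, hkn, hik]

lemma pv_keys_insert {V : Type} (d : PySem.Dict String V) (k : String) (v : V) :
    (d.insert k v).keys = PySem.Set.add d.keys k := by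
  by_cases hc : d.contains k = true
  · rw [PySem.Dict.keys_insert_of_contains _ _ hc]
    have hm : k ∈ d.keys := (PySem.Dict.contains_iff_mem_keys _ _).mp hc
    simp [PySem.Set.add, PySem.Set.contains, hm]
  · rw [PySem.Dict.keys_insert_of_not_contains _ _ (by simpa using hc)]
    have hm : ¬ k ∈ d.keys := fun h => hc ((PySem.Dict.contains_iff_mem_keys _ _).mpr h)
    simp [PySem.Set.add, PySem.Set.contains, hm]

lemma pv_flags_keys (l : List String) :
    (l.foldl pvUpd PySem.Dict.empty).keys = PySem.Set.ofList (l.flatMap pvTouch) := by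
  induction l using List.reverseRecOn with
  | nil => simp [PySem.Set.ofList_eq_foldl]
  | append_singleton l n ih =>
      rw [List.foldl_append, List.foldl_cons, List.foldl_nil,
        List.flatMap_append, List.flatMap_cons, List.flatMap_nil, List.append_nil,
        PySem.Set.ofList_eq_foldl, List.foldl_append, ← PySem.Set.ofList_eq_foldl, ← ih]
      unfold pvUpd pvTouch
      by_cases hp : PySem.Str.startswith n "_id_" = true
      · rw [if_pos hp, if_pos hp]
        simp only []
        rw [pv_keys_insert, pv_keys_insert]
        rfl
      · rw [if_neg hp, if_neg hp]
        simp only []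
        rw [pv_keys_insert]
        rfl

lemma pv_flags_nodup (l : List String) : (l.foldl pvUpd PySem.Dict.empty).keys.Nodup := by
  rw [pv_flags_keys]
  exact PySem.Set.nodup_ofList _

-- ---- generic fold-with-idempotent-adds lemmas ----

def pvDone (e : String → Option String) (s : List String) (k : String) : Prop :=
  ∀ v, e k = some v → v ∈ s

lemma pv_mem_step (e : String → Option String) {s : List String} {v : String} (k : String)
    (h : v ∈ s) : v ∈ pvStep e s k := by
  unfold pvStep
  cases e k with
  | none => exact h
  | some w => exact (PySem.Set.mem_add _ _ _).mpr (Or.inl h)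

lemma pv_done_step (e : String → Option String) (s : List String) (k : String) :
    pvDone e (pvStep e s k) k := by
  intro v hv
  unfold pvStep
  rw [hv]
  exact (PySem.Set.mem_add _ _ _).mpr (Or.inr rfl)

lemma pv_done_mono (e : String → Option String) {s : List String} {k : String} (k' : String)
    (h : pvDone e s k) : pvDone e (pvStep e s k') k :=
  fun v hv => pv_mem_step e k' (h v hv)

lemma pv_step_of_done (e : String → Option String) {s : List String} {k : String}
    (h : pvDone e s k) : pvStep e s k = s := by
  unfold pvStep
  cases he : e k with
  | none => rfl
  | some v =>
      have hv := h v he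
      simp [PySem.Set.add, PySem.Set.contains, hv]

lemma pv_done_foldl_of_done (e : String → Option String) (K : List String) :
    ∀ (s : List String) (x : String), pvDone e s x → pvDone e (K.foldl (pvStep e) s) x := by
  induction K with
  | nil => intro s x h; exact h
  | cons k K ih => intro s x h; exact ih _ x (pv_done_mono e k h)

lemma pv_done_foldl (e : String → Option String) (K : List String) :
    ∀ (s : List String) (x : String), x ∈ K → pvDone e (K.foldl (pvStep e) s) x := by
  induction K with
  | nil => intro s x h; cases h
  | cons k K ih =>
      intro s x h
      rcases List.mem_cons.mp h with h | h
      · subst h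
        exact pv_done_foldl_of_done e K _ x (pv_done_step e s x)
      · exact ih _ x h

lemma pv_fold_dedup (e : String → Option String) (L : List String) :
    ∀ (K s : List String),
      (L.foldl PySem.Set.add K).foldl (pvStep e) s
        = L.foldl (pvStep e) (K.foldl (pvStep e) s) := by
  induction L with
  | nil => intro K s; rfl
  | cons x L ih =>
      intro K s
      simp only [List.foldl_cons]
      rw [ih]
      congr 1
      by_cases hx : x ∈ K
      · have : PySem.Set.add K x = K := by
          simp [PySem.Set.add, PySem.Set.contains, hx]
        rw [this, pv_step_of_done e (pv_done_foldl e K s x hx)]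
      · have : PySem.Set.add K x = K ++ [x] := by
          simp [PySem.Set.add, PySem.Set.contains, hx]
        rw [this, List.foldl_append]
        rfl

lemma pv_fold_ofList (e : String → Option String) (L : List String) (s : List String) :
    (PySem.Set.ofList L).foldl (pvStep e) s = L.foldl (pvStep e) s := by
  have h := pv_fold_dedup e L [] s
  simpa [PySem.Set.ofList_eq_foldl] using h

lemma pv_foldl_flatMap (f : List String → String → List String) (t : String → List String) :
    ∀ (l : List String) (s : List String),
      (l.flatMap t).foldl f s = l.foldl (fun s n => (t n).foldl f s) s := by
  intro l
  induction l with
  | nil => intro s; rfl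
  | cons n l ih =>
      intro s
      simp only [List.flatMap_cons, List.foldl_append, List.foldl_cons]
      exact ih _

-- ---- per-name agreement of the two emissions ----

lemma pv_touch_step (names : List String) (n : String) (hn : n ∈ names) (s : List String) :
    (pvTouch n).foldl (pvStep (pvE names)) s = pvStep (pvEA names) s n := by
  unfold pvTouch
  by_cases hp : PySem.Str.startswith n "_id_" = true
  · rw [if_pos hp]
    have hp' : PySem.Chars.startswith n.toList ['_', 'i', 'd', '_'] = true := by simpa using hp
    have hrec := pv_pref_recover hp
    simp only [List.foldl_cons, List.foldl_nil]
    have h1 : pvStep (pvE names) s n = s := by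
      unfold pvStep pvE
      simp [hn, hp']
    rw [h1]
    unfold pvStep pvE pvEA
    rw [hrec]
    by_cases hb : PySem.Str.slice n (some 4) none ∈ names <;> simp [hb, hn, hp']
  · rw [if_neg hp]
    have hp' : PySem.Chars.startswith n.toList ['_', 'i', 'd', '_'] = false := by
      simpa using hp
    simp only [List.foldl_cons, List.foldl_nil]
    unfold pvStep pvE pvEA
    by_cases hm : ("_id_" ++ n) ∈ names <;> simp [hn, hp', hm]

-- ---- the two ports as emission folds ----

lemma pv_A_eq (names : List String) :
    add_warn_log_if_column_missing names = names.foldl (pvStep (pvEA names)) PySem.Set.empty := by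
  unfold add_warn_log_if_column_missing
  congr 1
  funext s i
  unfold pvStep pvEA
  by_cases hp : PySem.Str.startswith i "_id_" = true
  · have hp' : PySem.Chars.startswith i.toList ['_', 'i', 'd', '_'] = true := by simpa using hp
    by_cases hm : PySem.Str.slice i (some 4) none ∈ names <;>
      simp [hp', hm, List.contains_eq_mem]
  · have hp' : PySem.Chars.startswith i.toList ['_', 'i', 'd', '_'] = false := by simpa using hp
    by_cases hm : ("_id_" ++ i) ∈ names <;>
      simp [hp', hm, List.contains_eq_mem]

lemma pv_B_eq (names : List String) :
    add_warn_log_if_column_missing_alt names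
      = (PySem.Set.ofList (names.flatMap pvTouch)).foldl (pvStep (pvE names)) PySem.Set.empty := by
  unfold add_warn_log_if_column_missing_alt
  simp only []
  rw [PySem.Dict.items_eq_map_keys _ (pv_flags_nodup names) (false, false, false)]
  have hmap : (names.foldl pvUpd PySem.Dict.empty).keys.map
        (fun k => (k, PySem.Dict.getD (names.foldl pvUpd PySem.Dict.empty) k (false, false, false)))
      = (names.foldl pvUpd PySem.Dict.empty).keys.map (fun k => (k, pvVal names k)) := by
    apply List.map_congr_left
    intro k _
    rw [pv_flags_getD]
  rw [hmap, List.foldl_map, pv_flags_keys]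
  apply List.foldl_ext
  intro s k _
  unfold pvStep pvE pvVal
  by_cases hk : k ∈ names <;> by_cases hik : ("_id_" ++ k) ∈ names <;>
    cases hsw : PySem.Chars.startswith k.toList ['_', 'i', 'd', '_'] <;>
      simp [hk, hik, hsw]

-- ===== VERDICT (by name: the statement is the Claim_ definition above) =====
theorem add_warn_log_if_column_missing_spec : Claim_equal_add_warn_log_if_column_missing := by
  intro names _
  unfold Spec_add_warn_log_if_column_missing
  rw [pv_A_eq, pv_B_eq, pv_fold_ofList, pv_foldl_flatMap]
  apply List.foldl_ext
  intro s n hn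
  exact (pv_touch_step names n hn s).symm
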